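-- pv_equiv track=rewrite | github.com/glbyktjys/NonPrefix_LMCacheDataset | offline_analysis/cacheblend_hashes.py | rolling_window_fingerprints
-- ===== SOURCE A (Python) =====
-- from typing import Dict, Iterable, List, Sequence
--
-- DEFAULT_CHUNK_SIZE = 256
--
-- DEFAULT_POLY_BASE = 0x9E3779B97F4A7C15
--
-- UINT64_MASK = (1 << 64) - 1
--
-- def _poly_hash(tokens: Sequence[int], base: int = DEFAULT_POLY_BASE) -> int:
--     value = 0
--     for token in tokens:
--         value = ((value * base) + (int(token) & UINT64_MASK)) & UINT64_MASK
--     return value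
--
-- def rolling_window_fingerprints(
--     token_ids: Sequence[int],
--     chunk_size: int = DEFAULT_CHUNK_SIZE,
--     base: int = DEFAULT_POLY_BASE,
-- ) -> List[int]:
--     """Return polynomial rolling hashes for every chunk-sized window."""
--     if chunk_size <= 0 or len(token_ids) < chunk_size:
--         return []
--
--     power = 1
--     for _ in range(chunk_size - 1):
--         power = (power * base) & UINT64_MASK
--
--     first_window = token_ids[:chunk_size]
--     current = _poly_hash(first_window, base)
--     fingerprints = [current]
--
--     for index in range(chunk_size, len(token_ids)):
--         old_token = int(token_ids[index - chunk_size]) & UINT64_MASK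
--         new_token = int(token_ids[index]) & UINT64_MASK
--         current = (current - ((old_token * power) & UINT64_MASK)) & UINT64_MASK
--         current = ((current * base) + new_token) & UINT64_MASK
--         fingerprints.append(current)
--     return fingerprints
-- ===== SOURCE B (Python) =====
-- DEFAULT_CHUNK_SIZE = 256
-- DEFAULT_POLY_BASE = 0x9E3779B97F4A7C15
-- UINT64_MASK = (1 << 64) - 1
--
--
-- def _poly_hash(tokens, base=DEFAULT_POLY_BASE):
--     value = 0
--     for token in tokens:
--         value = ((value * base) + (int(token) & UINT64_MASK)) & UINT64_MASK
--     return value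
--
--
-- def rolling_window_fingerprints(token_ids, chunk_size=DEFAULT_CHUNK_SIZE, base=DEFAULT_POLY_BASE):
--     """Hash every window from scratch: no rolling state, no precomputed power."""
--     if chunk_size <= 0 or len(token_ids) < chunk_size:
--         return []
--     return [
--         _poly_hash(token_ids[start:start + chunk_size], base)
--         for start in range(len(token_ids) - chunk_size + 1)
--     ]
-- ===== Notes on version B (the rewrite author's own statement) =====
-- stated objective: simpler
-- what changed: Replaces the rolling-hash update (maintained accumulator plus precomputed power of the base) by recomputing each window's polynomial hash from scratch in a comprehension over start indices.
import Mathlib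
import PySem

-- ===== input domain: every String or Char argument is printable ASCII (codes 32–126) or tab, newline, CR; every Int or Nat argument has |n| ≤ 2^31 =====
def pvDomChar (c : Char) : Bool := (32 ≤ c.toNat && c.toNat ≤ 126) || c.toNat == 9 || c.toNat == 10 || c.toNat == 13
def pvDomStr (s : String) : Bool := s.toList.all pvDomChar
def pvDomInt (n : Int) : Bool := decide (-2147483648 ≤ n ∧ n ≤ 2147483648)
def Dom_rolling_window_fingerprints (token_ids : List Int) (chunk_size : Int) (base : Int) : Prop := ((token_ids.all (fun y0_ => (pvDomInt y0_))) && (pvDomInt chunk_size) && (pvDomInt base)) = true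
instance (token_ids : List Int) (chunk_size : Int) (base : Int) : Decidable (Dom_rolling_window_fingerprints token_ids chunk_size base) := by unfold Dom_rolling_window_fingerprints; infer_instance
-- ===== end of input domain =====

-- B recomputes each window's hash from scratch (a comprehension over start indices) instead of A's
-- rolling accumulator with a precomputed power of the base; simpler, same return value.

-- ===== PORT A =====
def UINT64_MASK : Int := 18446744073709551615

def _poly_hash (tokens : List Int) (base : Int) : Int :=
  tokens.foldl (fun value token =>
    PySem.Int.band (value * base + PySem.Int.band token UINT64_MASK) UINT64_MASK) 0

-- the body of A's rolling loop, one iteration (helper so the loop lemma can name it)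
def pvStepA (token_ids : List Int) (chunk_size base power : Int) (st : Int × List Int) (index : Int) : Int × List Int :=
  let old_token := PySem.Int.band (PySem.List.pyGetD token_ids (index - chunk_size) 0) UINT64_MASK
  let new_token := PySem.Int.band (PySem.List.pyGetD token_ids index 0) UINT64_MASK
  let c1 := PySem.Int.band (st.1 - PySem.Int.band (old_token * power) UINT64_MASK) UINT64_MASK
  let c2 := PySem.Int.band (c1 * base + new_token) UINT64_MASK
  (c2, st.2 ++ [c2])

def rolling_window_fingerprints (token_ids : List Int) (chunk_size : Int) (base : Int) : List Int :=
  if chunk_size ≤ 0 ∨ (token_ids.length : Int) < chunk_size then []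
  else
    let power := (PySem.List.pyRange 0 (chunk_size - 1) 1).foldl
      (fun p _ => PySem.Int.band (p * base) UINT64_MASK) 1
    let first_window := PySem.List.slice token_ids none (some chunk_size)
    let current := _poly_hash first_window base
    let res := (PySem.List.pyRange chunk_size (token_ids.length : Int) 1).foldl
      (pvStepA token_ids chunk_size base power) (current, [current])
    res.2

-- ===== PORT B =====
def rolling_window_fingerprints_alt (token_ids : List Int) (chunk_size : Int) (base : Int) : List Int :=
  if chunk_size ≤ 0 ∨ (token_ids.length : Int) < chunk_size then []
  else (PySem.List.pyRange 0 ((token_ids.length : Int) - chunk_size + 1) 1).map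
    (fun start => _poly_hash (PySem.List.slice token_ids (some start) (some (start + chunk_size))) base)

-- ===== PRECONDITION & SPEC =====
def Spec_rolling_window_fingerprints (token_ids : List Int) (chunk_size : Int) (base : Int) (out : List Int) : Prop := out = rolling_window_fingerprints_alt token_ids chunk_size base
instance (token_ids : List Int) (chunk_size : Int) (base : Int) (out : List Int) : Decidable (Spec_rolling_window_fingerprints token_ids chunk_size base out) := by unfold Spec_rolling_window_fingerprints; infer_instance

-- ===== CLAIM (what is proved, stated in full; the proofs are below) =====
def Claim_equal_rolling_window_fingerprints : Prop := ∀ (token_ids : List Int) (chunk_size : Int) (base : Int), Dom_rolling_window_fingerprints token_ids chunk_size base → Spec_rolling_window_fingerprints token_ids chunk_size base (rolling_window_fingerprints token_ids chunk_size base)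

-- ===== LEMMAS AND PROOFS =====

-- 2^64, the modulus behind UINT64_MASK
def pvM : Int := 18446744073709551616

-- the pure (unmasked) polynomial accumulator
def pvPoly (b : Int) (l : List Int) (v : Int) : Int := l.foldl (fun a t => a * b + t) v

-- the hash of the window of length c starting at s
def pvH (tids : List Int) (b : Int) (c s : Nat) : Int := pvPoly b ((tids.drop s).take c) 0 % pvM

theorem pv_band_mask (a : Int) : PySem.Int.band a UINT64_MASK = a % pvM := by
  rcases le_or_gt 0 a with ha | ha
  · have h1 : PySem.Int.band a UINT64_MASK = ((a.toNat &&& (18446744073709551615 : Nat) : Nat) : Int) := by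
      simp [PySem.Int.band, UINT64_MASK, ha]
    rw [h1]
    have h2 : a.toNat &&& (18446744073709551615 : Nat) = a.toNat % 2^64 :=
      Nat.and_two_pow_sub_one_eq_mod a.toNat 64
    rw [h2]
    have h3 : a = (a.toNat : Int) := (Int.toNat_of_nonneg ha).symm
    rw [pvM]
    omega
  · have hm : (0:Int) ≤ UINT64_MASK := by norm_num [UINT64_MASK]
    have hna : ¬ (0 ≤ a) := not_le.mpr ha
    have h1 : PySem.Int.band a UINT64_MASK =
        ((UINT64_MASK.toNat - (UINT64_MASK.toNat &&& (-a - 1).toNat) : Nat) : Int) := by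
      simp [PySem.Int.band, hna, hm]
    rw [h1]
    have h2 : (18446744073709551615 : Nat) &&& (-a - 1).toNat = (-a-1).toNat % 2^64 := by
      rw [Nat.and_comm]; exact Nat.and_two_pow_sub_one_eq_mod _ 64
    have h3 : UINT64_MASK.toNat = 18446744073709551615 := by rfl
    rw [h3, h2]
    have h4 : (-a - 1).toNat = (-a-1) := Int.toNat_of_nonneg (by omega)
    rw [pvM]
    omega

theorem pv_emod_modeq (a : Int) : a % pvM ≡ a [ZMOD pvM] :=
  Int.emod_emod_of_dvd a (dvd_refl pvM)

theorem pv_poly_hash_aux (b : Int) (l : List Int) : ∀ v : Int,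
    l.foldl (fun value token =>
      PySem.Int.band (value * b + PySem.Int.band token UINT64_MASK) UINT64_MASK) (v % pvM)
      = pvPoly b l v % pvM := by
  induction l with
  | nil => intro v; simp [pvPoly]
  | cons t rest ih =>
    intro v
    have hstep : PySem.Int.band ((v % pvM) * b + PySem.Int.band t UINT64_MASK) UINT64_MASK
        = (v * b + t) % pvM := by
      rw [pv_band_mask, pv_band_mask]
      have : (v % pvM) * b + t % pvM ≡ v * b + t [ZMOD pvM] :=
        ((pv_emod_modeq v).mul_right b).add (pv_emod_modeq t)
      exact this
    simp only [List.foldl_cons, hstep]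
    have := ih (v * b + t)
    simpa [pvPoly] using this

theorem pv_poly_hash_eq (b : Int) (l : List Int) :
    _poly_hash l b = pvPoly b l 0 % pvM := by
  have := pv_poly_hash_aux b l 0
  simpa [_poly_hash] using this

theorem pv_power_eq (b : Int) (l : List Int) : ∀ p : Int,
    l.foldl (fun p _ => PySem.Int.band (p * b) UINT64_MASK) (p % pvM) = (p * b ^ l.length) % pvM := by
  induction l with
  | nil => intro p; simp
  | cons t rest ih =>
    intro p
    have hstep : PySem.Int.band ((p % pvM) * b) UINT64_MASK = (p * b) % pvM := by
      rw [pv_band_mask]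
      exact (pv_emod_modeq p).mul_right b
    simp only [List.foldl_cons, hstep]
    rw [ih (p * b)]
    rw [List.length_cons, pow_succ]
    ring_nf

theorem pvPoly_shift (b : Int) (l : List Int) : ∀ v : Int,
    pvPoly b l v = v * b ^ l.length + pvPoly b l 0 := by
  induction l with
  | nil => intro v; simp [pvPoly]
  | cons t rest ih =>
    intro v
    simp only [pvPoly, List.foldl_cons] at *
    rw [ih (v * b + t), ih (0 * b + t)]
    simp [List.length_cons]
    ring

theorem pvPoly_append (b : Int) (l : List Int) (t v : Int) :
    pvPoly b (l ++ [t]) v = pvPoly b l v * b + t := by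
  simp [pvPoly]

-- one rolling step turns the hash of the window at s into the hash of the window at s+1
theorem pv_stepA_eq (tids : List Int) (b : Int) (c s : Nat) (acc : List Int) (cur : Int)
    (hc1 : 1 ≤ c) (hlt : s + c < tids.length) (hcur : cur = pvH tids b c s) :
    pvStepA tids (c : Int) b (b ^ (c - 1) % pvM) (cur, acc) ((s + c : Nat) : Int)
      = (pvH tids b c (s + 1), acc ++ [pvH tids b c (s + 1)]) := by
  have hs : s < tids.length := by omega
  have hsc : s + c < tids.length := hlt
  have hidx : ((s + c : Nat) : Int) - (c : Int) = (s : Nat) := by push_cast; ring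
  have hold : PySem.List.pyGetD tids (((s + c : Nat) : Int) - (c : Int)) 0 = tids[s] := by
    rw [hidx, PySem.List.pyGetD_natCast, List.getD_eq_getElem _ _ hs]
  have hnew : PySem.List.pyGetD tids ((s + c : Nat) : Int) 0 = tids[s + c] := by
    rw [PySem.List.pyGetD_natCast, List.getD_eq_getElem _ _ hsc]
  -- window decomposition
  have hdrop : tids.drop s = tids[s] :: tids.drop (s + 1) := List.drop_eq_getElem_cons hs
  set x : Int := tids[s] with hx
  set y : Int := tids[s + c] with hy
  set u : List Int := (tids.drop (s + 1)).take (c - 1) with hu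
  have hw : (tids.drop s).take c = x :: u := by
    rw [hdrop, show c = (c - 1) + 1 by omega, List.take_succ_cons]
  have hulen : u.length = c - 1 := by
    rw [hu, List.length_take, List.length_drop]; omega
  have hget : (tids.drop (s + 1))[c - 1]? = some y := by
    rw [List.getElem?_drop]
    rw [hy, List.getElem?_eq_getElem (by omega : s + 1 + (c - 1) < tids.length)]
    have hidx2 : s + 1 + (c - 1) = s + c := by omega
    simp [hidx2]
  have hw2 : (tids.drop (s + 1)).take c = u ++ [y] := by
    conv_lhs => rw [show c = (c - 1) + 1 by omega]
    rw [List.take_add_one, hget]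
    rfl
  -- arithmetic
  have hHs : pvH tids b c s = (x * b ^ (c - 1) + pvPoly b u 0) % pvM := by
    rw [pvH, hw]
    have : pvPoly b (x :: u) 0 = pvPoly b u x := by
      simp [pvPoly]
    rw [this, pvPoly_shift b u x, hulen]
  have hHs1 : pvH tids b c (s + 1) = (pvPoly b u 0 * b + y) % pvM := by
    rw [pvH, hw2, pvPoly_append]
  -- compute the step
  have hc2 : PySem.Int.band
      ((PySem.Int.band (cur - PySem.Int.band
          (PySem.Int.band x UINT64_MASK * (b ^ (c - 1) % pvM)) UINT64_MASK) UINT64_MASK) * b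
        + PySem.Int.band y UINT64_MASK) UINT64_MASK
      = pvH tids b c (s + 1) := by
    simp only [pv_band_mask]
    rw [hcur, hHs, hHs1]
    have h1 : (x % pvM) * (b ^ (c - 1) % pvM) ≡ x * b ^ (c - 1) [ZMOD pvM] :=
      (pv_emod_modeq x).mul (pv_emod_modeq (b ^ (c - 1)))
    have h2 : ((x * b ^ (c - 1) + pvPoly b u 0) % pvM
        - (x % pvM) * (b ^ (c - 1) % pvM) % pvM) ≡ pvPoly b u 0 [ZMOD pvM] := by
      calc ((x * b ^ (c - 1) + pvPoly b u 0) % pvM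
            - (x % pvM) * (b ^ (c - 1) % pvM) % pvM)
          ≡ (x * b ^ (c - 1) + pvPoly b u 0) - x * b ^ (c - 1) [ZMOD pvM] :=
            (pv_emod_modeq _).sub ((pv_emod_modeq _).trans h1)
        _ = pvPoly b u 0 := by ring
    have h3 : (((x * b ^ (c - 1) + pvPoly b u 0) % pvM
        - (x % pvM) * (b ^ (c - 1) % pvM) % pvM) % pvM * b + y % pvM)
        ≡ pvPoly b u 0 * b + y [ZMOD pvM] :=
      (((pv_emod_modeq _).trans h2).mul_right b).add (pv_emod_modeq _)
    exact h3
  simp only [pvStepA, hold, hnew]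
  rw [hc2]

-- the rolling loop produces exactly the window hashes
theorem pv_loopA (tids : List Int) (b : Int) (c : Nat) (hc1 : 1 ≤ c) :
    ∀ (k s : Nat) (acc : List Int), s + c + k = tids.length →
    ((PySem.List.pyRange ((s + c : Nat) : Int) ((tids.length : Nat) : Int) 1).foldl
      (pvStepA tids (c : Int) b (b ^ (c - 1) % pvM)) (pvH tids b c s, acc)).2
    = acc ++ (List.range k).map (fun j => pvH tids b c (s + 1 + j)) := by
  intro k
  induction k with
  | zero =>
    intro s acc h
    have : ((s + c : Nat) : Int) = ((tids.length : Nat) : Int) := by omega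
    rw [this]
    simp
  | succ k ih =>
    intro s acc h
    have hlt : ((s + c : Nat) : Int) < ((tids.length : Nat) : Int) := by push_cast; omega
    rw [PySem.List.pyRange_one_cons hlt]
    rw [List.foldl_cons]
    rw [pv_stepA_eq tids b c s acc _ hc1 (by omega) rfl]
    have hcast : ((s + c : Nat) : Int) + 1 = (((s + 1) + c : Nat) : Int) := by push_cast; ring
    rw [hcast]
    rw [ih (s + 1) (acc ++ [pvH tids b c (s + 1)]) (by omega)]
    have hmap : (List.range (k + 1)).map (fun j => pvH tids b c (s + 1 + j))
        = pvH tids b c (s + 1) :: (List.range k).map (fun j => pvH tids b c (s + 1 + 1 + j)) := by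
      rw [List.range_succ_eq_map, List.map_cons, List.map_map]
      congr 1
      apply List.map_congr_left
      intro j hj
      simp only [Function.comp]
      congr 1
      omega
    rw [hmap]
    simp

theorem pv_main (tids : List Int) (cs b : Int) :
    rolling_window_fingerprints tids cs b = rolling_window_fingerprints_alt tids cs b := by
  by_cases hg : cs ≤ 0 ∨ (tids.length : Int) < cs
  · rw [rolling_window_fingerprints, rolling_window_fingerprints_alt, if_pos hg, if_pos hg]
  · have hc0 : 0 < cs := by omega
    have hlen : cs ≤ (tids.length : Int) := by omega
    obtain ⟨c, hc⟩ : ∃ c : Nat, cs = (c : Int) := ⟨cs.toNat, by omega⟩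
    subst hc
    have hng : ¬((c : Int) ≤ 0 ∨ (tids.length : Int) < (c : Int)) := by omega
    have hc1 : 1 ≤ c := by omega
    have hcn : c ≤ tids.length := by omega
    have hpow : (PySem.List.pyRange 0 ((c : Int) - 1) 1).foldl
        (fun p _ => PySem.Int.band (p * b) UINT64_MASK) 1 = b ^ (c - 1) % pvM := by
      have h := pv_power_eq b (PySem.List.pyRange 0 ((c : Int) - 1) 1) 1
      rw [show (1 : Int) % pvM = 1 by norm_num [pvM]] at h
      rw [PySem.List.length_pyRange_one, show ((c : Int) - 1 - 0).toNat = c - 1 by omega, one_mul] at h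
      exact h
    have hfw : _poly_hash (PySem.List.slice tids none (some (c : Int))) b = pvH tids b c 0 := by
      rw [PySem.List.slice_to_natCast, pv_poly_hash_eq, pvH, List.drop_zero]
    have hA : rolling_window_fingerprints tids (c : Int) b
        = (List.range (tids.length - c + 1)).map (fun k => pvH tids b c k) := by
      rw [rolling_window_fingerprints, if_neg hng]
      simp only [hpow, hfw]
      have hl := pv_loopA tids b c hc1 (tids.length - c) 0 [pvH tids b c 0] (by omega)
      simp only [Nat.zero_add] at hl
      rw [hl]
      conv_rhs => rw [List.range_succ_eq_map, List.map_cons, List.map_map]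
      rw [List.singleton_append]
      congr 1
      apply List.map_congr_left
      intro j hj
      simp only [Function.comp]
      congr 1
      omega
    have hB : rolling_window_fingerprints_alt tids (c : Int) b
        = (List.range (tids.length - c + 1)).map (fun k => pvH tids b c k) := by
      rw [rolling_window_fingerprints_alt, if_neg hng, PySem.List.pyRange_one]
      have hT : (((tids.length : Int) - (c : Int) + 1) - 0).toNat = tids.length - c + 1 := by omega
      rw [hT, List.map_map]
      apply List.map_congr_left
      intro k hk
      simp only [Function.comp]
      have h0 : (0 : Int) + (k : Int) = ((k : Nat) : Int) := by ring
      rw [h0, PySem.List.slice_natCast_add, pv_poly_hash_eq, pvH]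
    rw [hA, hB]

-- ===== VERDICT (by name: the statement is the Claim_ definition above) =====
theorem rolling_window_fingerprints_spec : Claim_equal_rolling_window_fingerprints := by
  intro token_ids chunk_size base _
  exact pv_main token_ids chunk_size base
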